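-- pv_equiv track=rewrite | github.com/ayukyo/alltoolkit | Python/music_utils/music_utils.py | key_signature
-- ===== SOURCE A (Python) =====
-- from enum import Enum, IntEnum
-- from typing import List, Tuple, Optional, Dict, Set
--
-- class NoteName(IntEnum):
--     """音符名称枚举"""
--     C = 0
--     C_SHARP = 1
--     D = 2
--     D_SHARP = 3
--     E = 4
--     F = 5
--     F_SHARP = 6
--     G = 7
--     G_SHARP = 8
--     A = 9
--     A_SHARP = 10
--     B = 11
--
-- def relative_major(minor_key: NoteName) -> NoteName:
--     """返回小调的关系大调"""
--     return NoteName((int(minor_key) + 3) % 12)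
--
-- def key_signature(key: NoteName, is_major: bool = True) -> List[NoteName]:
--     """
--     返回调号中的升降号
--
--     Args:
--         key: 调式主音
--         is_major: 是否为大调
--
--     Returns:
--         升号或降号音名列表
--     """
--     # 升号顺序: F#, C#, G#, D#, A#, E#, B#
--     sharps_order = [NoteName.F_SHARP, NoteName.C_SHARP, NoteName.G_SHARP,
--                     NoteName.D_SHARP, NoteName.A_SHARP, NoteName.F, NoteName.C]
--     # 降号顺序: Bb, Eb, Ab, Db, Gb, Cb, Fb
--     flats_order = [NoteName.A_SHARP, NoteName.D_SHARP, NoteName.G_SHARP,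
--                    NoteName.C_SHARP, NoteName.F_SHARP, NoteName.B, NoteName.E]
--
--     # 大调升号调: G, D, A, E, B, F#, C#
--     sharp_keys = [NoteName.G, NoteName.D, NoteName.A, NoteName.E,
--                   NoteName.B, NoteName.F_SHARP, NoteName.C_SHARP]
--     # 大调降号调: F, Bb, Eb, Ab, Db, Gb, Cb
--     flat_keys = [NoteName.F, NoteName.A_SHARP, NoteName.D_SHARP,
--                  NoteName.G_SHARP, NoteName.C_SHARP, NoteName.F_SHARP, NoteName.B]
--
--     if is_major:
--         for i, k in enumerate(sharp_keys):
--             if k == key: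
--                 return sharps_order[:i + 1]
--         for i, k in enumerate(flat_keys):
--             if k == key:
--                 return flats_order[:i + 1]
--     else:
--         # 小调：找关系大调的调号
--         rel_major = relative_major(key)
--         return key_signature(rel_major, True)
--
--     return []  # C 大调无升降号
-- ===== SOURCE B (Python) =====
-- def key_signature(key, is_major=True):
--     """Closed-form circle-of-fifths inverse instead of table scans.
--
--     A major tonic i fifths above C is (7*i) % 12; since 7 is its own inverse
--     mod 12, the sharp count is simply (7*key) % 12, and the flat count is
--     (5*key) % 12 (5 = 7^-1's mirror, inverse of a fourth).  The accidental
--     list is generated by stepping a note by fifths (sharps, from F#) or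
--     fourths (flats, from Bb) with an accumulator -- no key tables, no
--     recursion for minor (its relative major is (key+3) % 12).
--     """
--     k = int(key) if is_major else (int(key) + 3) % 12
--     if not 0 <= k < 12:
--         return []  # not a NoteName: no signature
--     i = (7 * k) % 12          # sharps: position of k on the sharp side
--     if 1 <= i <= 7:
--         note, out = 6, []     # start at F#
--         for _ in range(i):
--             out.append(note)
--             note = (note + 7) % 12
--         return out
--     j = (5 * k) % 12          # flats: position of k on the flat side
--     if 1 <= j <= 7:
--         note, out = 10, []    # start at Bb
--         for _ in range(j):
--             out.append(note)
--             note = (note + 5) % 12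
--         return out
--     return []
-- ===== Notes on version B (the rewrite author's own statement) =====
-- stated objective: simpler
-- what changed: B drops A's key tables, enumerate-scans and minor recursion: the sharp/flat count is computed in closed form as (7*key)%12 / (5*key)%12 (7 and 5 are self-inverse mod 12 on the circle of fifths), the accidental list is generated by stepping a note by fifths/fourths with an accumulator, and a minor key is pre-transformed to (key+3)%12 instead of recursing.
import Mathlib
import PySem

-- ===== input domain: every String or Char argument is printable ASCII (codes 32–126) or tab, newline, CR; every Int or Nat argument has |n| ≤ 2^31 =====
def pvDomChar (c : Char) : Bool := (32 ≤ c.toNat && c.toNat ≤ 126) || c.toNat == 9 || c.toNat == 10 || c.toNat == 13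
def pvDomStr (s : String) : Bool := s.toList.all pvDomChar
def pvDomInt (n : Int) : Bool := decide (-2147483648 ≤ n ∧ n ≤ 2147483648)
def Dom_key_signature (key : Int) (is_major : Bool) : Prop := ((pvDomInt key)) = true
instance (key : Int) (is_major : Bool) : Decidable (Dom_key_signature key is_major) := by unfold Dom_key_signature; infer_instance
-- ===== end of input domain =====

-- B replaces A's table scans and minor recursion with a closed-form circle-of-fifths inverse
-- and iterative accidental generation (objective: simpler).


-- ===== PORT A =====
-- A: scan hardcoded sharp_keys/flat_keys for the key, return a prefix of the
-- matching accidental order (sharps checked first); minor recurses via relative_major.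
def key_signature (key : Int) (is_major : Bool) : List Int :=
  let sharps_order : List Int := [6, 1, 8, 3, 10, 5, 0]
  let flats_order : List Int := [10, 3, 8, 1, 6, 11, 4]
  let sharp_keys : List Int := [7, 2, 9, 4, 11, 6, 1]
  let flat_keys : List Int := [5, 10, 3, 8, 1, 6, 11]
  if is_major then
    match (PySem.List.enumerate sharp_keys).find? (fun p => p.2 == key) with
    | some p => PySem.List.slice sharps_order none (some (p.1 + 1))
    | none =>
      match (PySem.List.enumerate flat_keys).find? (fun p => p.2 == key) with
      | some p => PySem.List.slice flats_order none (some (p.1 + 1))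
      | none => []
  else
    key_signature (PySem.Int.mod (key + 3) 12) true
termination_by (if is_major then 0 else 1)
decreasing_by simp_all

-- ===== PORT B =====
-- B's accumulator loop: append `note`, step by `step` (mod 12), `count` times.
def ksGen (note : Int) (step : Int) : Nat → List Int
  | 0 => []
  | n + 1 => note :: ksGen (PySem.Int.mod (note + step) 12) step n

-- B: closed-form inverse on the circle of fifths; sharps count = (7*k)%12,
-- flats count = (5*k)%12; accidentals generated by stepping in fifths/fourths;
-- minor pre-transformed to its relative major, no recursion.
def key_signature_alt (key : Int) (is_major : Bool) : List Int :=
  let k := if is_major then key else PySem.Int.mod (key + 3) 12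
  if 0 ≤ k ∧ k < 12 then
    let i := PySem.Int.mod (7 * k) 12
    if 1 ≤ i ∧ i ≤ 7 then
      ksGen 6 7 i.toNat
    else
      let j := PySem.Int.mod (5 * k) 12
      if 1 ≤ j ∧ j ≤ 7 then
        ksGen 10 5 j.toNat
      else []
  else []

-- ===== PRECONDITION & SPEC =====
def Spec_key_signature (key : Int) (is_major : Bool) (out : List Int) : Prop := out = key_signature_alt key is_major
instance (key : Int) (is_major : Bool) (out : List Int) : Decidable (Spec_key_signature key is_major out) := by unfold Spec_key_signature; infer_instance

-- ===== CLAIM (what is proved, stated in full; the proofs are below) =====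
def Claim_equal_key_signature : Prop := ∀ (key : Int) (is_major : Bool), Dom_key_signature key is_major → Spec_key_signature key is_major (key_signature key is_major)

-- ===== LEMMAS AND PROOFS =====
lemma major_eq (key : Int) : key_signature key true = key_signature_alt key true := by
  by_cases h0 : key = 0; · subst h0; rw [key_signature]; decide
  by_cases h1 : key = 1; · subst h1; rw [key_signature]; decide
  by_cases h2 : key = 2; · subst h2; rw [key_signature]; decide
  by_cases h3 : key = 3; · subst h3; rw [key_signature]; decide
  by_cases h4 : key = 4; · subst h4; rw [key_signature]; decide
  by_cases h5 : key = 5; · subst h5; rw [key_signature]; decide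
  by_cases h6 : key = 6; · subst h6; rw [key_signature]; decide
  by_cases h7 : key = 7; · subst h7; rw [key_signature]; decide
  by_cases h8 : key = 8; · subst h8; rw [key_signature]; decide
  by_cases h9 : key = 9; · subst h9; rw [key_signature]; decide
  by_cases h10 : key = 10; · subst h10; rw [key_signature]; decide
  by_cases h11 : key = 11; · subst h11; rw [key_signature]; decide
  -- key outside 0..11: A's scans find nothing, B's range guard fails
  have hout : ¬ (0 ≤ key ∧ key < 12) := by omega
  rw [key_signature]
  have e1 : ((1:Int) == key) = false := by simp [Ne.symm h1]
  have e2 : ((2:Int) == key) = false := by simp [Ne.symm h2]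
  have e3 : ((3:Int) == key) = false := by simp [Ne.symm h3]
  have e4 : ((4:Int) == key) = false := by simp [Ne.symm h4]
  have e5 : ((5:Int) == key) = false := by simp [Ne.symm h5]
  have e6 : ((6:Int) == key) = false := by simp [Ne.symm h6]
  have e7 : ((7:Int) == key) = false := by simp [Ne.symm h7]
  have e8 : ((8:Int) == key) = false := by simp [Ne.symm h8]
  have e9 : ((9:Int) == key) = false := by simp [Ne.symm h9]
  have e10 : ((10:Int) == key) = false := by simp [Ne.symm h10]
  have e11 : ((11:Int) == key) = false := by simp [Ne.symm h11]
  simp [key_signature_alt, hout, PySem.List.enumerate, List.find?,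
    e1, e2, e3, e4, e5, e6, e7, e8, e9, e10, e11]

-- ===== VERDICT (by name: the statement is the Claim_ definition above) =====
theorem key_signature_spec : Claim_equal_key_signature := by
  intro key is_major _
  unfold Spec_key_signature
  cases is_major
  · -- minor: A recurses to the relative major; B pre-transforms the key
    rw [key_signature]
    simp only [Bool.false_eq_true, if_false]
    have h := major_eq (PySem.Int.mod (key + 3) 12)
    rw [h]
    simp [key_signature_alt]
  · exact major_eq key
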